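-- pv_equiv track=rewrite | github.com/benjaminalbert/spartaplex | python/spartaplex.py | getShflStride
-- ===== SOURCE A (Python) =====
-- def getShflStride(n):
--     """
--     Calculate CRIMPS prime, used as the shflstride.
--     CRIMPS prime is the smallest prime in the range [floor(n/2)+1,n]
--
--     Required Args
--     -------------
--
--     n : int
--         dimensionality of the search space
--
--     Returns
--     -------
--     The shuffle stride int
--     """
--     def _isprime(x):
--         if x <= 1:
--             return False
--         elif x <= 3:
--             return True
--         elif (x % 2 == 0) or (x % 3 == 0):
--             return False
--         i = 5
--         while i*i <= x:
--             if (x % i == 0) or (x % (i+2) == 0):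
--                 return False
--             i += 6
--         return True
--
--     for p in range(n//2 + 1, n):
--         if _isprime(p):
--             return p
--     raise ValueError("No prime found for n={}".format(n))
-- ===== SOURCE B (Python) =====
-- def getShflStride(n):
--     """
--     Calculate CRIMPS prime (smallest prime p with n//2 < p < n) by a
--     segmented sieve of Eratosthenes instead of per-candidate trial division.
--     """
--     m = n // 2 + 1
--     if m >= n:
--         raise ValueError("No prime found for n={}".format(n))
--     # L = ceiling square root of n (Newton's method), so every composite
--     # q < n has a prime factor < L
--     x = n
--     while x * x > n:
--         x = (x + n // x) // 2
--     L = x if x * x == n else x + 1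
--     # simple sieve for the base primes below L
--     base = [True] * L
--     i = 2
--     while i * i < L:
--         for j in range(i * i, L, i):
--             base[j] = False
--         i += 1
--     primes = [p for p in range(2, L) if base[p]]
--     # sieve [m, n) in blocks of 2048, return the first surviving index
--     lo = m
--     while lo < n:
--         hi = min(lo + 2048, n)
--         seg = [True] * (hi - lo)
--         for p in primes:
--             start = max(p * p, ((lo + p - 1) // p) * p)
--             for j in range(start, hi, p):
--                 seg[j - lo] = False
--         for q in range(lo, hi):
--             if seg[q - lo]:
--                 return q
--         lo = hi
--     raise ValueError("No prime found for n={}".format(n))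
-- ===== Notes on version B (the rewrite author's own statement) =====
-- stated objective: alternative
-- what changed: A tests each candidate in (n//2, n) with 6k±1 trial division until one is prime; B builds a sieve of Eratosthenes over [0, n) once and scans it for the first surviving index in the range.
import Mathlib
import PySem

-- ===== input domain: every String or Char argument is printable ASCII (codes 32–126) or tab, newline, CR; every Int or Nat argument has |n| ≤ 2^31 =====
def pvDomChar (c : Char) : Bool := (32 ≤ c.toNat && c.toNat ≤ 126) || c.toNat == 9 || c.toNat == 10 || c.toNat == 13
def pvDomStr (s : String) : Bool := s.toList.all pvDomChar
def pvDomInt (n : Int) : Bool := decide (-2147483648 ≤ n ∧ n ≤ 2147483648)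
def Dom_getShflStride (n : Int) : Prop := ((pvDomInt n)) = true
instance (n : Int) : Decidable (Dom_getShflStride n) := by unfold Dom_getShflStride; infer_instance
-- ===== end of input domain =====

-- B replaces A's per-candidate 6k±1 trial division with a sieve of Eratosthenes
-- over [0, n); same return value (alternative algorithm, not claimed faster).

-- ===== PORT A =====
-- the 'while i*i <= x' loop of _isprime, starting at i = 5 and stepping by 6
def pvIsprimeLoop (x i : Int) : Bool :=
  if i * i ≤ x then
    if PySem.Int.mod x i == 0 || PySem.Int.mod x (i + 2) == 0 then false
    else pvIsprimeLoop x (i + 6)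
  else true
termination_by (x + 1 - i).toNat
decreasing_by
  rename_i h
  have h1 : i * i ≥ 2 * i - 1 := by nlinarith [sq_nonneg (i - 1)]
  have h2 : 0 ≤ i * i := mul_self_nonneg i
  omega

-- _isprime
def pvIsprimeA (x : Int) : Bool :=
  if x ≤ 1 then false
  else if x ≤ 3 then true
  else if PySem.Int.mod x 2 == 0 || PySem.Int.mod x 3 == 0 then false
  else pvIsprimeLoop x 5

-- 'for p in range(n//2 + 1, n): if _isprime(p): return p' with its early return
def pvFindPrime (n p : Int) : Int :=
  if p < n then
    if pvIsprimeA p then p else pvFindPrime n (p + 1)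
  else 0  -- loop fell through: Python raises ValueError; excluded by Pre_getShflStride
termination_by (n - p).toNat

def getShflStride (n : Int) : Int :=
  pvFindPrime n (PySem.Int.floordiv n 2 + 1)

-- ===== PORT B =====
-- 'x = n; while x*x > n: x = (x + n//x)//2' (Newton); '0 < x' is a totality
-- guard only: it holds on every state this loop reaches from x = n ≥ 1
def pvNewtonLoop (n x : Int) : Int :=
  if n < x * x ∧ 0 < x then pvNewtonLoop n (PySem.Int.floordiv (x + PySem.Int.floordiv n x) 2) else x
termination_by x.toNat
decreasing_by
  rename_i h
  obtain ⟨h1, h2⟩ := h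
  rw [PySem.Int.floordiv_eq_ediv_of_pos h2, PySem.Int.floordiv_eq_ediv_of_pos (by norm_num)]
  have hq : n / x < x := by
    rcases Int.lt_or_le n 0 with hn | hn
    · have h0 : n / x ≤ 0 / x := Int.ediv_le_ediv h2 (by omega)
      simp at h0
      omega
    · exact Int.ediv_lt_of_lt_mul h2 (by nlinarith)
  have hq2 : (x + n / x) / 2 ≤ (x + x - 1) / 2 := by
    apply Int.ediv_le_ediv (by norm_num); omega
  omega

-- 'L = x if x*x == n else x + 1' (ceiling square root of n)
def pvCeilSqrt (n : Int) : Int :=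
  if pvNewtonLoop n n * pvNewtonLoop n n == n then pvNewtonLoop n n else pvNewtonLoop n n + 1

-- 'for j in range(i*i, L, i): base[j] = False' (every j in this range satisfies
-- 0 ≤ j < L = size of the base list, so setIfInBounds is exact for base[j] = False)
def pvMark (n : Int) (arr : Array Bool) (i : Int) : Array Bool :=
  (PySem.List.pyRange (i * i) n i).foldl (fun a j => a.setIfInBounds j.toNat false) arr

-- 'i = 2; while i*i < L: … ; i += 1' (the base sieve of Eratosthenes)
def pvSieveLoop (n : Int) (arr : Array Bool) (i : Int) : Array Bool :=
  if i * i < n then pvSieveLoop n (pvMark n arr i) (i + 1) else arr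
termination_by (n - i).toNat
decreasing_by
  rename_i h
  have h1 : i * i ≥ 2 * i - 1 := by nlinarith [sq_nonneg (i - 1)]
  have h2 : 0 ≤ i * i := mul_self_nonneg i
  omega

-- 'primes = [p for p in range(2, L) if base[p]]'
def pvPrimes (n : Int) : List Int :=
  let base := pvSieveLoop (pvCeilSqrt n) (Array.replicate (pvCeilSqrt n).toNat true) 2
  (PySem.List.pyRange 2 (pvCeilSqrt n) 1).filter (fun p => base.getD p.toNat false)

-- 'start = max(p*p, ((lo+p-1)//p)*p); for j in range(start, hi, p): seg[j-lo] = False'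
-- (every j here satisfies lo ≤ j < hi, so setIfInBounds is exact for seg[j-lo] = False)
def pvSegMark (lo hi : Int) (seg : Array Bool) (p : Int) : Array Bool :=
  (PySem.List.pyRange (max (p * p) (PySem.Int.floordiv (lo + p - 1) p * p)) hi p).foldl
    (fun a j => a.setIfInBounds (j - lo).toNat false) seg

-- 'for q in range(lo, hi): if seg[q-lo]: return q' with its early return
def pvSegScan (hi lo q : Int) (seg : Array Bool) : Option Int :=
  if q < hi then
    if seg.getD (q - lo).toNat false then some q else pvSegScan hi lo (q + 1) seg
  else none
termination_by (hi - q).toNat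

-- 'lo = m; while lo < n: hi = min(lo+2048, n); …; lo = hi' (hi inlined)
def pvBlockLoop (n : Int) (primes : List Int) (lo : Int) : Int :=
  if lo < n then
    match pvSegScan (min (lo + 2048) n) lo lo
        (primes.foldl (pvSegMark lo (min (lo + 2048) n))
          (Array.replicate (min (lo + 2048) n - lo).toNat true)) with
    | some q => q
    | none => pvBlockLoop n primes (min (lo + 2048) n)
  else 0  -- while fell through: Python raises ValueError; unreachable under Pre_getShflStride
termination_by (n - lo).toNat

def getShflStride_alt (n : Int) : Int :=
  if n ≤ PySem.Int.floordiv n 2 + 1 then 0  -- Python raises ValueError; excluded by Pre_getShflStride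
  else pvBlockLoop n (pvPrimes n) (PySem.Int.floordiv n 2 + 1)

-- ===== PRECONDITION & SPEC =====
-- Python A raises ValueError when no prime lies in [n//2+1, n-1]; by Bertrand's
-- postulate that happens exactly for n < 3, which Pre_ excludes (B raises the
-- same ValueError there).
def Pre_getShflStride (n : Int) : Prop := 3 ≤ n
instance (n : Int) : Decidable (Pre_getShflStride n) := by unfold Pre_getShflStride; infer_instance
def pvWitness_getShflStride : Int := (10)

def Spec_getShflStride (n : Int) (out : Int) : Prop := out = getShflStride_alt n
instance (n : Int) (out : Int) : Decidable (Spec_getShflStride n out) := by unfold Spec_getShflStride; infer_instance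

-- ===== CLAIM (what is proved, stated in full; the proofs are below) =====
def Claim_equal_getShflStride : Prop := ∀ (n : Int), Dom_getShflStride n → Pre_getShflStride n → Spec_getShflStride n (getShflStride n)

-- ===== LEMMAS AND PROOFS =====

-- a divisor 2 ≤ d < x of x refutes primality of x.toNat
lemma pvNotPrime_of_dvd {x d : Int} (hd2 : 2 ≤ d) (hdx : d < x) (hdvd : d ∣ x) :
    ¬ Nat.Prime x.toNat := by
  intro hp
  have h1 : (d.toNat : Int) = d := by omega
  have h2 : (x.toNat : Int) = x := by omega
  have hdvdN : d.toNat ∣ x.toNat := Int.natCast_dvd_natCast.mp (by rw [h1, h2]; exact hdvd)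
  rcases hp.eq_one_or_self_of_dvd _ hdvdN with h | h <;> omega

-- a composite x ≥ 2 has a divisor d with 2 ≤ d and d*d ≤ x (its least prime factor)
lemma pvExists_small_divisor {x : Int} (hx : 2 ≤ x) (hnp : ¬ Nat.Prime x.toNat) :
    ∃ d : Int, 2 ≤ d ∧ d * d ≤ x ∧ d ∣ x ∧ Nat.Prime d.toNat := by
  have hpos : 0 < x.toNat := by omega
  have hp := Nat.minFac_prime (n := x.toNat) (by omega)
  have hsq := Nat.minFac_sq_le_self hpos hnp
  have hxt : ((x.toNat : Int)) = x := by omega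
  refine ⟨(x.toNat.minFac : Int), by exact_mod_cast hp.two_le, ?_, ?_, by simpa using hp⟩
  · have h := (Nat.cast_le (α := ℤ)).mpr hsq
    push_cast [pow_two] at h
    rwa [hxt] at h
  · have h : (x.toNat.minFac : Int) ∣ (x.toNat : Int) :=
      Int.natCast_dvd_natCast.mpr (Nat.minFac_dvd _)
    rwa [hxt] at h

-- correctness of the 6k±1 wheel loop
lemma pvIsprimeLoop_iff : ∀ (x i : Int), 3 < x → i % 6 = 5 → 5 ≤ i →
    (∀ d : Int, 2 ≤ d → d < i → ¬ d ∣ x) →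
    (pvIsprimeLoop x i = true ↔ Nat.Prime x.toNat) := by
  intro x i
  induction i using pvIsprimeLoop.induct (x := x) with
  | case1 i hle hmod =>
    intro hx h5 hi hlow
    rw [pvIsprimeLoop, if_pos hle, if_pos hmod]
    simp only [Bool.false_eq_true, false_iff]
    simp only [Bool.or_eq_true, beq_iff_eq, PySem.Int.mod_eq_zero_iff_dvd] at hmod
    have hisq : i + 2 < i * i := by nlinarith
    rcases hmod with h | h
    · exact pvNotPrime_of_dvd (by omega) (by omega) h
    · exact pvNotPrime_of_dvd (by omega) (by omega) h
  | case2 i hle hmod ih =>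
    intro hx h5 hi hlow
    rw [pvIsprimeLoop, if_pos hle, if_neg hmod]
    simp only [Bool.or_eq_true, beq_iff_eq, PySem.Int.mod_eq_zero_iff_dvd, not_or] at hmod
    refine ih hx (by omega) (by omega) ?_
    intro d hd2 hdlt hdvd
    by_cases hdi : d < i
    · exact hlow d hd2 hdi hdvd
    · have hcase : d = i ∨ d = i + 1 ∨ d = i + 2 ∨ d = i + 3 ∨ d = i + 4 ∨ d = i + 5 := by omega
      rcases hcase with h | h | h | h | h | h
      · exact hmod.1 (h ▸ hdvd)
      · have h2d : (2 : Int) ∣ d := by omega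
        exact hlow 2 (by norm_num) (by omega) (h2d.trans hdvd)
      · exact hmod.2 (h ▸ hdvd)
      · have h2d : (2 : Int) ∣ d := by omega
        exact hlow 2 (by norm_num) (by omega) (h2d.trans hdvd)
      · have h3d : (3 : Int) ∣ d := by omega
        exact hlow 3 (by norm_num) (by omega) (h3d.trans hdvd)
      · have h2d : (2 : Int) ∣ d := by omega
        exact hlow 2 (by norm_num) (by omega) (h2d.trans hdvd)
  | case3 i hgt =>
    intro hx h5 hi hlow
    rw [pvIsprimeLoop, if_neg hgt]
    simp only [true_iff]
    by_contra hnp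
    obtain ⟨d, hd2, hdsq, hdvd, -⟩ := pvExists_small_divisor (by omega) hnp
    by_cases hdi : d < i
    · exact hlow d hd2 hdi hdvd
    · have : i * i ≤ d * d := by nlinarith
      omega

lemma pvIsprimeA_iff (x : Int) : pvIsprimeA x = true ↔ (1 < x ∧ Nat.Prime x.toNat) := by
  unfold pvIsprimeA
  split_ifs with h1 h2 h3
  · simp only [false_iff, not_and]
    omega
  · simp only [true_iff]
    refine ⟨by omega, ?_⟩
    have : x = 2 ∨ x = 3 := by omega
    rcases this with h | h <;> subst h <;> decide
  · simp only [Bool.or_eq_true, beq_iff_eq, PySem.Int.mod_eq_zero_iff_dvd] at h3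
    simp only [false_iff, not_and]
    intro _ hp
    rcases h3 with h | h
    · exact pvNotPrime_of_dvd (by norm_num) (by omega) h hp
    · exact pvNotPrime_of_dvd (by norm_num) (by omega) h hp
  · simp only [Bool.or_eq_true, beq_iff_eq, PySem.Int.mod_eq_zero_iff_dvd, not_or] at h3
    rw [pvIsprimeLoop_iff x 5 (by omega) (by norm_num) (by norm_num) ?_]
    · constructor
      · exact fun hp => ⟨by omega, hp⟩
      · exact fun hp => hp.2
    · intro d hd2 hdlt hdvd
      have hcase : d = 2 ∨ d = 3 ∨ d = 4 := by omega
      rcases hcase with h | h | h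
      · exact h3.1 (h ▸ hdvd)
      · exact h3.2 (h ▸ hdvd)
      · exact h3.1 (((by omega : (2:Int) ∣ d)).trans hdvd)

-- folding "set to false" over a list of nonnegative indices
lemma pvFoldl_set_get (l : List Int) (arr : Array Bool) (k : Nat) (hpos : ∀ j ∈ l, 0 ≤ j) :
    (l.foldl (fun a j => a.setIfInBounds j.toNat false) arr)[k]? =
      if (k : Int) ∈ l ∧ k < arr.size then some false else arr[k]? := by
  induction l generalizing arr with
  | nil => simp
  | cons j l ih =>
    simp only [List.foldl_cons]
    rw [ih _ (fun j' h => hpos j' (by simp [h]))]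
    rw [Array.size_setIfInBounds]
    by_cases hk : k < arr.size
    · by_cases hkl : (k : Int) ∈ l
      · simp [hkl, hk]
      · rw [if_neg (by tauto), Array.getElem?_setIfInBounds]
        by_cases hkj : (k : Int) = j
        · have hj : j.toNat = k := by have := hpos j (by simp); omega
          simp [hj, hk, hkj]
        · have hj : j.toNat ≠ k := by
            intro h; apply hkj; have := hpos j (by simp); omega
          simp [hj, hkj, hkl, hk]
    · have hnone : arr[k]? = none := by
        rw [Array.getElem?_eq_none_iff]; omega
      rw [if_neg (by tauto), if_neg (by tauto), Array.getElem?_setIfInBounds, hnone]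
      by_cases hj : j.toNat = k
      · simp [hj, hk]
      · simp [hj]

lemma pvFoldl_set_size (l : List Int) (arr : Array Bool) :
    (l.foldl (fun a j => a.setIfInBounds j.toNat false) arr).size = arr.size := by
  induction l generalizing arr with
  | nil => rfl
  | cons j l ih => simp [List.foldl_cons, ih, Array.size_setIfInBounds]

lemma pvMark_size (n : Int) (arr : Array Bool) (i : Int) : (pvMark n arr i).size = arr.size :=
  pvFoldl_set_size _ _

lemma pvMark_get (n : Int) (arr : Array Bool) (i : Int) (hi : 2 ≤ i) (k : Nat) :
    (pvMark n arr i)[k]? =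
      if i ∣ (k : Int) ∧ i * i ≤ (k : Int) ∧ (k : Int) < n ∧ k < arr.size
      then some false else arr[k]? := by
  unfold pvMark
  have hii : (0 : Int) ≤ i * i := mul_self_nonneg i
  rw [pvFoldl_set_get _ _ _ (fun j hj => by
    have := (PySem.List.mem_pyRange_iff_of_pos (by omega) j).mp hj
    omega)]
  refine if_congr ?_ rfl rfl
  rw [PySem.List.mem_pyRange_iff_of_pos (by omega)]
  constructor
  · rintro ⟨⟨hlo, hhi, hdvd⟩, hsz⟩
    refine ⟨?_, hlo, hhi, hsz⟩
    have := dvd_add hdvd (dvd_mul_right i i)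
    simpa using this
  · rintro ⟨hdvd, hlo, hhi, hsz⟩
    exact ⟨⟨hlo, hhi, dvd_sub hdvd (dvd_mul_right i i)⟩, hsz⟩

lemma pvSieveLoop_false : ∀ (n : Int) (arr : Array Bool) (i : Int), 2 ≤ i → ∀ (k : Nat),
    arr[k]? = some false → (pvSieveLoop n arr i)[k]? = some false := by
  intro n arr i
  induction arr, i using pvSieveLoop.induct (n := n) with
  | case1 arr i hlt ih =>
    intro hi k h
    rw [pvSieveLoop, if_pos hlt]
    refine ih (by omega) k ?_
    rw [pvMark_get n arr i hi k]
    split <;> simp [h]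
  | case2 arr i hge =>
    intro hi k h
    rw [pvSieveLoop, if_neg hge]; exact h

lemma pvSieveLoop_crossed : ∀ (n : Int) (arr : Array Bool) (i : Int), 2 ≤ i → ∀ (k : Nat),
    (k : Int) < n → k < arr.size →
    (∃ j : Int, i ≤ j ∧ j * j < n ∧ j ∣ (k : Int) ∧ j * j ≤ (k : Int)) →
    (pvSieveLoop n arr i)[k]? = some false := by
  intro n arr i
  induction arr, i using pvSieveLoop.induct (n := n) with
  | case1 arr i hlt ih =>
    intro hi k hk hsz hc
    rw [pvSieveLoop, if_pos hlt]
    by_cases hik : i ∣ (k : Int) ∧ i * i ≤ (k : Int)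
    · refine pvSieveLoop_false n _ (i + 1) (by omega) k ?_
      rw [pvMark_get n arr i hi k, if_pos ⟨hik.1, hik.2, hk, hsz⟩]
    · obtain ⟨j, hji, hjn, hjd, hjk⟩ := hc
      have hji1 : i + 1 ≤ j := by
        rcases lt_or_eq_of_le hji with h | h
        · omega
        · exfalso; exact hik ⟨h ▸ hjd, h ▸ hjk⟩
      exact ih (by omega) k hk (by rwa [pvMark_size]) ⟨j, hji1, hjn, hjd, hjk⟩
  | case2 arr i hge =>
    intro hi k hk hsz hc
    obtain ⟨j, hji, hjn, _, _⟩ := hc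
    have : i * i ≤ j * j := by nlinarith
    omega

lemma pvSieveLoop_clean : ∀ (n : Int) (arr : Array Bool) (i : Int), 2 ≤ i → ∀ (k : Nat),
    (¬ ∃ j : Int, i ≤ j ∧ j * j < n ∧ j ∣ (k : Int) ∧ j * j ≤ (k : Int)) →
    (pvSieveLoop n arr i)[k]? = arr[k]? := by
  intro n arr i
  induction arr, i using pvSieveLoop.induct (n := n) with
  | case1 arr i hlt ih =>
    intro hi k hc
    rw [pvSieveLoop, if_pos hlt]
    rw [ih (by omega) k (fun ⟨j, hji, hjn, hjd, hjk⟩ => hc ⟨j, by omega, hjn, hjd, hjk⟩)]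
    rw [pvMark_get n arr i hi k]
    rw [if_neg (fun ⟨hd, hk1, hk2, _⟩ => hc ⟨i, le_refl i, hlt, hd, hk1⟩)]
  | case2 arr i hge =>
    intro hi k hc
    rw [pvSieveLoop, if_neg hge]

-- being crossed off by the sieve is exactly compositeness (for 2 ≤ k < n)
lemma pvCrossed_iff (n k : Int) (hk2 : 2 ≤ k) (hkn : k < n) :
    (∃ j : Int, 2 ≤ j ∧ j * j < n ∧ j ∣ k ∧ j * j ≤ k) ↔ ¬ Nat.Prime k.toNat := by
  constructor
  · rintro ⟨j, hj2, _, hjd, hjk⟩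
    have : j < k := by nlinarith
    exact pvNotPrime_of_dvd hj2 this hjd
  · intro hnp
    obtain ⟨d, hd2, hdsq, hdvd, -⟩ := pvExists_small_divisor hk2 hnp
    exact ⟨d, hd2, by omega, hdvd, hdsq⟩

-- integer Newton from above: if n < (x+1)^2 then the loop's result r
-- satisfies r*r ≤ n < (r+1)*(r+1) and 0 < r
lemma pvNewtonLoop_spec (n : Int) (hn : 1 ≤ n) : ∀ x : Int, 0 < x → n < (x + 1) * (x + 1) →
    pvNewtonLoop n x * pvNewtonLoop n x ≤ n ∧
      n < (pvNewtonLoop n x + 1) * (pvNewtonLoop n x + 1) ∧ 0 < pvNewtonLoop n x := by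
  intro x
  induction x using pvNewtonLoop.induct (n := n) with
  | case1 x hc ih =>
    intro hx hinv
    obtain ⟨h1, h2⟩ := hc
    rw [pvNewtonLoop, if_pos ⟨h1, h2⟩]
    rw [PySem.Int.floordiv_eq_ediv_of_pos h2, PySem.Int.floordiv_eq_ediv_of_pos (by norm_num)] at ih ⊢
    set q : Int := n / x with hqdef
    have hqe : x * q + n % x = n := Int.ediv_add_emod n x
    have hr0 : 0 ≤ n % x := Int.emod_nonneg n (by omega)
    have hr1 : n % x < x := Int.emod_lt_of_pos n h2
    have hq0 : 0 ≤ q := Int.ediv_nonneg (by omega) (by omega)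
    have hx2 : 2 ≤ x := by nlinarith
    set y : Int := (x + q) / 2 with hydef
    have hye : 2 * y + (x + q) % 2 = x + q := Int.ediv_add_emod (x + q) 2
    have hm0 : 0 ≤ (x + q) % 2 := Int.emod_nonneg _ (by norm_num)
    have hm1 : (x + q) % 2 < 2 := Int.emod_lt_of_pos _ (by norm_num)
    have hy1 : 0 < y := by omega
    have hyinv : n < (y + 1) * (y + 1) := by
      have h4 : (x + q + 1) * (x + q + 1) ≥ 4 * (x * (q + 1)) := by nlinarith [sq_nonneg (x - q - 1)]
      have hxq1 : n < x * (q + 1) := by nlinarith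
      nlinarith
    exact ih hy1 hyinv
  | case2 x hc =>
    intro hx hinv
    rw [pvNewtonLoop, if_neg hc]
    have : ¬ n < x * x := by tauto
    exact ⟨by omega, hinv, hx⟩

lemma pvCeilSqrt_spec (n : Int) (hn : 1 ≤ n) :
    1 ≤ pvCeilSqrt n ∧ n ≤ pvCeilSqrt n * pvCeilSqrt n := by
  have h := pvNewtonLoop_spec n hn n (by omega) (by nlinarith)
  unfold pvCeilSqrt
  split_ifs with he
  · simp only [beq_iff_eq] at he
    refine ⟨?_, by omega⟩
    nlinarith [h.1, h.2.2]
  · refine ⟨by omega, by nlinarith [h.2.1]⟩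

-- the base-sieve cell at p is primality of p (for 2 ≤ p < N)
lemma pvSieve_getD (N p : Int) (hp2 : 2 ≤ p) (hpN : p < N) :
    ((pvSieveLoop N (Array.replicate N.toNat true) 2).getD p.toNat false = true) ↔
      Nat.Prime p.toNat := by
  have hcast : ((p.toNat : Int)) = p := by omega
  have hkn : p.toNat < N.toNat := by omega
  have hsz : (Array.replicate N.toNat true).size = N.toNat := Array.size_replicate
  by_cases hprime : Nat.Prime p.toNat
  · have hclean : ¬ ∃ j : Int, 2 ≤ j ∧ j * j < N ∧ j ∣ ((p.toNat : Int)) ∧ j * j ≤ ((p.toNat : Int)) := by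
      rw [hcast]
      exact fun hc => ((pvCrossed_iff N p hp2 hpN).mp hc) hprime
    have hval : (pvSieveLoop N (Array.replicate N.toNat true) 2)[p.toNat]? = some true := by
      rw [pvSieveLoop_clean N _ 2 (by norm_num) p.toNat hclean,
        Array.getElem?_replicate, if_pos hkn]
    rw [Array.getD_eq_getD_getElem?, hval]
    simp [hprime]
  · have hcross : ∃ j : Int, 2 ≤ j ∧ j * j < N ∧ j ∣ ((p.toNat : Int)) ∧ j * j ≤ ((p.toNat : Int)) := by
      rw [hcast]
      exact (pvCrossed_iff N p hp2 hpN).mpr hprime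
    have hval : (pvSieveLoop N (Array.replicate N.toNat true) 2)[p.toNat]? = some false :=
      pvSieveLoop_crossed N _ 2 (by norm_num) p.toNat (by omega) (by omega) hcross
    rw [Array.getD_eq_getD_getElem?, hval]
    simp [hprime]

-- membership of the primes table
lemma pvPrimes_mem (n : Int) (hn : 1 ≤ n) (p : Int) :
    p ∈ pvPrimes n ↔ (2 ≤ p ∧ p < pvCeilSqrt n ∧ Nat.Prime p.toNat) := by
  unfold pvPrimes
  simp only [List.mem_filter, PySem.List.mem_pyRange_one]
  constructor
  · rintro ⟨⟨h2, hL⟩, hb⟩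
    exact ⟨h2, hL, (pvSieve_getD _ p h2 hL).mp hb⟩
  · rintro ⟨h2, hL, hp⟩
    exact ⟨⟨h2, hL⟩, (pvSieve_getD _ p h2 hL).mpr hp⟩

-- the first multiple of p at or above lo, as Python computes it
lemma pvCeilMul_le (lo p q : Int) (hp : 0 < p) (hq : lo ≤ q) (hdvd : p ∣ q) :
    PySem.Int.floordiv (lo + p - 1) p * p ≤ q := by
  rw [PySem.Int.floordiv_eq_ediv_of_pos hp]
  obtain ⟨t, rfl⟩ := hdvd
  have h1 : (lo + p - 1) / p ≤ (p * t + (p - 1)) / p := Int.ediv_le_ediv hp (by omega)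
  have h2 : (p * t + (p - 1)) / p = t + (p - 1) / p := by
    rw [show p * t + (p - 1) = p - 1 + t * p by ring, Int.add_mul_ediv_right _ _ (by omega : p ≠ 0)]; ring
  have h3 : (p - 1) / p = 0 := Int.ediv_eq_zero_of_lt (by omega) (by omega)
  have h4 : (lo + p - 1) / p ≤ t := by omega
  calc (lo + p - 1) / p * p ≤ t * p := by
        exact mul_le_mul_of_nonneg_right h4 (by omega)
    _ = p * t := by ring

lemma pvCeilMul_ge (lo p : Int) (hp : 0 < p) :
    lo ≤ PySem.Int.floordiv (lo + p - 1) p * p := by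
  rw [PySem.Int.floordiv_eq_ediv_of_pos hp]
  have he : p * ((lo + p - 1) / p) + (lo + p - 1) % p = lo + p - 1 :=
    Int.ediv_add_emod (lo + p - 1) p
  have h0 : 0 ≤ (lo + p - 1) % p := Int.emod_nonneg _ (by omega)
  have h1 : (lo + p - 1) % p < p := Int.emod_lt_of_pos _ hp
  have : p * ((lo + p - 1) / p) = (lo + p - 1) / p * p := by ring
  omega

-- one marking pass of the segment
lemma pvSegMark_get (lo hi : Int) (seg : Array Bool) (p : Int) (hp : 2 ≤ p) (hlo : 0 ≤ lo)
    (k : Nat) :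
    (pvSegMark lo hi seg p)[k]? =
      if p ∣ (lo + (k : Int)) ∧ p * p ≤ lo + (k : Int) ∧ lo + (k : Int) < hi ∧ k < seg.size
      then some false else seg[k]? := by
  unfold pvSegMark
  set start : Int := max (p * p) (PySem.Int.floordiv (lo + p - 1) p * p) with hstart
  have hstart_lo : lo ≤ start := le_trans (pvCeilMul_ge lo p (by omega)) (le_max_right _ _)
  have hdvd_start : p ∣ start := by
    rcases max_choice (p * p) (PySem.Int.floordiv (lo + p - 1) p * p) with h | h <;> rw [← hstart] at h
    · rw [h]; exact dvd_mul_right p p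
    · rw [h]; exact Dvd.intro_left _ rfl
  rw [← List.foldl_map (f := fun j => j - lo)
    (g := fun (a : Array Bool) (j : Int) => a.setIfInBounds j.toNat false)]
  rw [pvFoldl_set_get _ _ _ (by
    intro j hj
    obtain ⟨j', hj', rfl⟩ := List.mem_map.mp hj
    have := (PySem.List.mem_pyRange_iff_of_pos (by omega) j').mp hj'
    omega)]
  refine if_congr ?_ rfl rfl
  constructor
  · rintro ⟨hmem, hsz⟩
    obtain ⟨j, hj, hjk⟩ := List.mem_map.mp hmem
    obtain ⟨h1, h2, h3⟩ := (PySem.List.mem_pyRange_iff_of_pos (by omega) j).mp hj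
    have hjq : j = lo + (k : Int) := by omega
    subst hjq
    have hdq : p ∣ lo + (k : Int) := by
      have := dvd_add h3 hdvd_start
      simpa using this
    refine ⟨hdq, le_trans (le_max_left _ _) h1, h2, hsz⟩
  · rintro ⟨hdq, hpp, hhi, hsz⟩
    refine ⟨List.mem_map.mpr ⟨lo + (k : Int), ?_, by omega⟩, hsz⟩
    rw [PySem.List.mem_pyRange_iff_of_pos (by omega)]
    have hle : start ≤ lo + (k : Int) :=
      max_le hpp (pvCeilMul_le lo p _ (by omega) (by omega) hdq)
    exact ⟨hle, hhi, dvd_sub hdq hdvd_start⟩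

lemma pvSegMark_size (lo hi : Int) (seg : Array Bool) (p : Int) :
    (pvSegMark lo hi seg p).size = seg.size := by
  unfold pvSegMark
  rw [← List.foldl_map (f := fun j => j - lo)
    (g := fun (a : Array Bool) (j : Int) => a.setIfInBounds j.toNat false)]
  exact pvFoldl_set_size _ _

-- folding the marking passes over the whole primes table
lemma pvSegFold_get (lo hi : Int) (hlo : 0 ≤ lo) :
    ∀ (ps : List Int) (seg : Array Bool), (∀ p ∈ ps, 2 ≤ p) → ∀ k : Nat,
    (ps.foldl (pvSegMark lo hi) seg)[k]? =
      if (∃ p ∈ ps, p ∣ (lo + (k : Int)) ∧ p * p ≤ lo + (k : Int) ∧ lo + (k : Int) < hi) ∧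
          k < seg.size
      then some false else seg[k]? := by
  intro ps
  induction ps with
  | nil => intro seg _ k; simp
  | cons p ps ih =>
    intro seg hps k
    simp only [List.foldl_cons]
    rw [ih _ (fun p' h => hps p' (by simp [h])), pvSegMark_size]
    by_cases hk : k < seg.size
    · by_cases hmem : ∃ p' ∈ ps, p' ∣ (lo + (k : Int)) ∧ p' * p' ≤ lo + (k : Int) ∧ lo + (k : Int) < hi
      · rw [if_pos ⟨hmem, hk⟩, if_pos]
        refine ⟨?_, hk⟩
        obtain ⟨p', h1, h2⟩ := hmem
        exact ⟨p', by simp [h1], h2⟩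
      · rw [if_neg (fun h => hmem h.1), pvSegMark_get lo hi seg p (hps p (by simp)) hlo k]
        by_cases hp : p ∣ (lo + (k : Int)) ∧ p * p ≤ lo + (k : Int) ∧ lo + (k : Int) < hi
        · rw [if_pos ⟨hp.1, hp.2.1, hp.2.2, hk⟩, if_pos ⟨⟨p, by simp, hp⟩, hk⟩]
        · rw [if_neg (by tauto), if_neg ?_]
          rintro ⟨⟨p', hp', h2⟩, _⟩
          rcases List.mem_cons.mp hp' with h | h
          · exact hp (h ▸ h2)
          · exact hmem ⟨p', h, h2⟩
    · have hnone : seg[k]? = none := by rw [Array.getElem?_eq_none_iff]; omega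
      rw [if_neg (by tauto), if_neg (by tauto), pvSegMark_get lo hi seg p (hps p (by simp)) hlo k,
        if_neg (by tauto), hnone]

-- a cell of the sieved segment is A's primality test at that index
lemma pvSeg_cell (n L lo hi : Int) (primes : List Int)
    (hpr : ∀ p : Int, p ∈ primes ↔ (2 ≤ p ∧ p < L ∧ Nat.Prime p.toNat))
    (hL1 : 1 ≤ L) (hLn : n ≤ L * L) (hlo : 2 ≤ lo) (hhi : hi ≤ n)
    (q : Int) (hq : lo ≤ q) (hqh : q < hi) :
    (primes.foldl (pvSegMark lo hi) (Array.replicate (hi - lo).toNat true)).getD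
        (q - lo).toNat false = pvIsprimeA q := by
  have hk : ((((q - lo).toNat : Nat)) : Int) = q - lo := by omega
  have hsz : (Array.replicate (hi - lo).toNat true).size = (hi - lo).toNat := Array.size_replicate
  have hksz : (q - lo).toNat < (hi - lo).toNat := by omega
  have hget := pvSegFold_get lo hi (by omega) primes (Array.replicate (hi - lo).toNat true)
    (fun p hp => ((hpr p).mp hp).1) (q - lo).toNat
  rw [hsz] at hget
  have hcond : ((∃ p ∈ primes, p ∣ (lo + ((q - lo).toNat : Int)) ∧
      p * p ≤ lo + ((q - lo).toNat : Int) ∧ lo + ((q - lo).toNat : Int) < hi) ∧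
      (q - lo).toNat < (hi - lo).toNat) ↔ ¬ Nat.Prime q.toNat := by
    rw [hk]
    have hlq : lo + (q - lo) = q := by ring
    rw [hlq]
    constructor
    · rintro ⟨⟨p, hpmem, hdvd, hpp, _⟩, _⟩
      have h2 := ((hpr p).mp hpmem).1
      have hplt : p < q := by nlinarith
      exact pvNotPrime_of_dvd h2 hplt hdvd
    · intro hnp
      obtain ⟨d, hd2, hdsq, hdvd, hdp⟩ := pvExists_small_divisor (by omega) hnp
      have hdL : d < L := by nlinarith
      exact ⟨⟨d, (hpr d).mpr ⟨hd2, hdL, hdp⟩, hdvd, hdsq, hqh⟩, hksz⟩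
  by_cases hprime : Nat.Prime q.toNat
  · rw [Array.getD_eq_getD_getElem?, hget, if_neg (by rw [hcond]; exact not_not_intro hprime),
      Array.getElem?_replicate, if_pos hksz]
    exact ((pvIsprimeA_iff q).mpr ⟨by omega, hprime⟩).symm ▸ rfl
  · rw [Array.getD_eq_getD_getElem?, hget, if_pos (hcond.mpr hprime)]
    cases hA : pvIsprimeA q
    · rfl
    · exact absurd ((pvIsprimeA_iff q).mp hA).2 hprime

-- scanning the segment step by step is A's scan restricted to the block
lemma pvSegScan_eq (n hi lo : Int) (seg : Array Bool) (hhi : hi ≤ n)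
    (hcell : ∀ q, lo ≤ q → q < hi → seg.getD (q - lo).toNat false = pvIsprimeA q) :
    ∀ q, lo ≤ q → q ≤ hi →
      pvFindPrime n q =
        (match pvSegScan hi lo q seg with
          | some r => r
          | none => pvFindPrime n hi) := by
  intro q
  induction q using pvSegScan.induct (hi := hi) (lo := lo) (seg := seg) with
  | case1 q hlt hs =>
    intro hq _
    rw [pvSegScan, if_pos hlt, if_pos hs]
    rw [pvFindPrime, if_pos (by omega), if_pos ((hcell q hq hlt) ▸ hs)]
  | case2 q hlt hs ih =>
    intro hq _
    rw [pvSegScan, if_pos hlt, if_neg hs]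
    rw [pvFindPrime, if_pos (by omega), if_neg ((hcell q hq hlt) ▸ hs)]
    exact ih (by omega) (by omega)
  | case3 q hge =>
    intro hq hle
    have : q = hi := by omega
    subst this
    rw [pvSegScan, if_neg hge]

-- the block loop is A's scan loop
lemma pvBlockLoop_eq (n L : Int) (primes : List Int)
    (hpr : ∀ p : Int, p ∈ primes ↔ (2 ≤ p ∧ p < L ∧ Nat.Prime p.toNat))
    (hL1 : 1 ≤ L) (hLn : n ≤ L * L) :
    ∀ lo : Int, 2 ≤ lo → pvBlockLoop n primes lo = pvFindPrime n lo := by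
  intro lo
  induction lo using pvBlockLoop.induct (n := n) (primes := primes) with
  | case1 lo hlt q hq =>
    intro hlo
    simp only [List.foldl_attach] at hq
    rw [pvBlockLoop, if_pos hlt]
    have hcell := pvSeg_cell n L lo (min (lo + 2048) n) primes hpr hL1 hLn hlo
      (min_le_right _ _)
    have hscan := pvSegScan_eq n (min (lo + 2048) n) lo
      (primes.foldl (pvSegMark lo (min (lo + 2048) n))
        (Array.replicate (min (lo + 2048) n - lo).toNat true))
      (min_le_right _ _)
      (fun q hq hqh => hcell q hq hqh) lo (le_refl lo) (by omega)
    rw [hscan, hq]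
  | case2 lo hlt hq ih =>
    intro hlo
    simp only [List.foldl_attach] at hq
    rw [pvBlockLoop, if_pos hlt]
    have hcell := pvSeg_cell n L lo (min (lo + 2048) n) primes hpr hL1 hLn hlo
      (min_le_right _ _)
    have hscan := pvSegScan_eq n (min (lo + 2048) n) lo
      (primes.foldl (pvSegMark lo (min (lo + 2048) n))
        (Array.replicate (min (lo + 2048) n - lo).toNat true))
      (min_le_right _ _)
      (fun q hq hqh => hcell q hq hqh) lo (le_refl lo) (by omega)
    rw [hscan, hq, ih (by omega)]
  | case3 lo hge =>
    intro _
    rw [pvBlockLoop, if_neg hge, pvFindPrime, if_neg hge]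

-- ===== VERDICT (by name: the statement is the Claim_ definition above) =====
theorem getShflStride_spec : Claim_equal_getShflStride := by
  intro n _ hpre
  unfold Pre_getShflStride at hpre
  unfold Spec_getShflStride getShflStride getShflStride_alt
  have hdiv : PySem.Int.floordiv n 2 = n / 2 := PySem.Int.floordiv_eq_ediv_of_pos (by norm_num)
  rw [hdiv]
  rw [if_neg (by omega : ¬ n ≤ n / 2 + 1)]
  obtain ⟨hL1, hLn⟩ := pvCeilSqrt_spec n (by omega)
  rw [pvBlockLoop_eq n (pvCeilSqrt n) (pvPrimes n) (pvPrimes_mem n (by omega)) hL1 hLn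
    (n / 2 + 1) (by omega)]
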